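-- pv_equiv track=rewrite | github.com/Olga-2308/LeetCode-Solutions | HashTable/Easy/3866_First_Unique_Even_Element.py | firstUniqueEven
-- ===== SOURCE A (Python) =====
-- def firstUniqueEven(nums: list[int]) -> int:
--
--     d = {}
--
--     # we determine the frequency of each number in the array
--     for num in nums:
--         if num not in d:
--             d[num] = 1
--         else:
--             d[num] += 1
--
--     # find the first even number with frequency 1 and return it
--     for num in nums:
--         if num % 2 == 0 and d[num] == 1:
--             return num
--
--     # If there is no such number in the array, then we return -1
--     return -1
-- ===== SOURCE B (Python) =====
-- def firstUniqueEven(nums: list[int]) -> int: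
--     # candidate-queue single pass: no frequency table, no second scan
--     cand = {}    # even values seen exactly once so far, in first-seen order
--     dup = set()  # even values seen more than once
--     for num in nums:
--         if num % 2 != 0 or num in dup:
--             continue
--         if num in cand:
--             del cand[num]
--             dup.add(num)
--         else:
--             cand[num] = True
--     return next(iter(cand), -1)
-- ===== Notes on version B (the rewrite author's own statement) =====
-- stated objective: alternative
-- what changed: Replaces the frequency dictionary plus second scan with a single-pass candidate queue: an insertion-ordered dict of evens seen exactly once and a set of evens seen twice, the answer being the queue's first key.
import Mathlib
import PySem

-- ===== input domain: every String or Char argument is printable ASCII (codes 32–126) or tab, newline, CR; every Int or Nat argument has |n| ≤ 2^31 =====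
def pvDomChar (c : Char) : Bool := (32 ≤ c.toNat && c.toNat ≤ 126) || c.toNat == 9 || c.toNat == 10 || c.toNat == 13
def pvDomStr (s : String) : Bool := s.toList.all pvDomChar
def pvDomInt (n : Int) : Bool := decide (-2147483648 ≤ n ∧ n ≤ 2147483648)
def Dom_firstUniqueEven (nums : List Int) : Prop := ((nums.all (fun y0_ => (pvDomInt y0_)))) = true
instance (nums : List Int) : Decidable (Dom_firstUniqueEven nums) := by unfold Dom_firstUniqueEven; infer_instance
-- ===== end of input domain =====

-- B replaces A's frequency dictionary + second scan by a single-pass candidate queue (alternative algorithm, same cost).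


-- ===== PORT A =====
-- first loop: build the frequency dict (branch order as in Python)
def fuBuild (nums : List Int) : PySem.Dict Int Int :=
  nums.foldl (fun d num =>
    if d.contains num = false then d.insert num 1
    else d.insert num (d.getD num 0 + 1)) PySem.Dict.empty

-- second loop: first even num with d[num] == 1 (num is always a key of d, so getD is exact for d[num])
def fuFind (d : PySem.Dict Int Int) : List Int → Int
  | [] => -1
  | num :: rest =>
    if PySem.Int.mod num 2 = 0 ∧ d.getD num 0 = 1 then num else fuFind d rest

def firstUniqueEven (nums : List Int) : Int :=
  fuFind (fuBuild nums) nums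

-- ===== PORT B =====
-- one loop step over the state (cand, dup)
def fuStep (st : PySem.Dict Int Bool × PySem.Set Int) (num : Int) : PySem.Dict Int Bool × PySem.Set Int :=
  if PySem.Int.mod num 2 ≠ 0 ∨ PySem.Set.contains st.2 num then st
  else if st.1.contains num then (st.1.erase num, PySem.Set.add st.2 num)
  else (st.1.insert num true, st.2)

-- next(iter(cand), -1) = the first key of the insertion-ordered dict, or -1
def firstUniqueEven_alt (nums : List Int) : Int :=
  match (nums.foldl fuStep (PySem.Dict.empty, PySem.Set.empty)).1.keys with
  | [] => -1
  | x :: _ => x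

-- ===== PRECONDITION & SPEC =====
def Spec_firstUniqueEven (nums : List Int) (out : Int) : Prop := out = firstUniqueEven_alt nums
instance (nums : List Int) (out : Int) : Decidable (Spec_firstUniqueEven nums out) := by unfold Spec_firstUniqueEven; infer_instance

-- ===== CLAIM (what is proved, stated in full; the proofs are below) =====
def Claim_equal_firstUniqueEven : Prop := ∀ (nums : List Int), Dom_firstUniqueEven nums → Spec_firstUniqueEven nums (firstUniqueEven nums)

-- ===== LEMMAS AND PROOFS =====

-- 'good p v' = v is even and occurs exactly once in p
def good (p : List Int) (v : Int) : Bool :=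
  decide (PySem.Int.mod v 2 = 0) && decide (p.count v = 1)

lemma good_true (p : List Int) (v : Int) (h1 : PySem.Int.mod v 2 = 0) (h2 : p.count v = 1) :
    good p v = true := by
  unfold good; rw [decide_eq_true h1, decide_eq_true h2]; rfl

lemma good_false_count (p : List Int) (v : Int) (h : p.count v ≠ 1) : good p v = false := by
  unfold good; rw [decide_eq_false h, Bool.and_false]

lemma good_false_odd (p : List Int) (v : Int) (h : PySem.Int.mod v 2 ≠ 0) : good p v = false := by
  unfold good; rw [decide_eq_false h, Bool.false_and]

lemma good_of_true (p : List Int) (v : Int) (h : good p v = true) :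
    PySem.Int.mod v 2 = 0 ∧ p.count v = 1 := by
  unfold good at h
  rw [Bool.and_eq_true, decide_eq_true_eq, decide_eq_true_eq] at h
  exact h

lemma count_append_singleton (p : List Int) (num v : Int) :
    (p ++ [num]).count v = p.count v + (if v = num then 1 else 0) := by
  rw [List.count_append]
  by_cases hv : v = num
  · subst hv; simp
  · simp [hv, Ne.symm hv]

-- A's branched update is the unconditional counter update
lemma fuBuild_step (d : PySem.Dict Int Int) (num : Int) :
    (if d.contains num = false then d.insert num 1
     else d.insert num (d.getD num 0 + 1)) = d.insert num (d.getD num 0 + 1) := by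
  by_cases h : d.contains num = false
  · rw [if_pos h, PySem.Dict.getD_of_not_contains d 0 h]; norm_num
  · rw [if_neg h]

lemma fuBuild_getD (nums : List Int) (v : Int) :
    (fuBuild nums).getD v 0 = (nums.count v : Int) := by
  unfold fuBuild
  have : (fun (d : PySem.Dict Int Int) num =>
      if d.contains num = false then d.insert num 1
      else d.insert num (d.getD num 0 + 1))
      = fun d num => d.insert num (d.getD num 0 + 1) := by
    funext d num; exact fuBuild_step d num
  rw [this, PySem.Dict.getD_foldl_insert_add_one, PySem.Dict.getD_empty]
  ring

-- A's second scan returns the head of the good-filtered list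
lemma fuFind_eq_headFilter (nums : List Int) (l : List Int) :
    fuFind (fuBuild nums) l =
      (match l.filter (good nums) with | [] => -1 | x :: _ => x) := by
  induction l with
  | nil => rfl
  | cons num rest ih =>
    have hunf : fuFind (fuBuild nums) (num :: rest) =
        (if PySem.Int.mod num 2 = 0 ∧ (fuBuild nums).getD num 0 = 1 then num
         else fuFind (fuBuild nums) rest) := rfl
    rw [List.filter_cons]
    by_cases h : PySem.Int.mod num 2 = 0 ∧ nums.count num = 1
    · have hg : good nums num = true := good_true nums num h.1 h.2
      have hcond : PySem.Int.mod num 2 = 0 ∧ (fuBuild nums).getD num 0 = 1 :=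
        ⟨h.1, by rw [fuBuild_getD]; exact_mod_cast h.2⟩
      rw [hunf, if_pos hcond, hg]
      rfl
    · have hg : good nums num = false := by
        by_cases h1 : PySem.Int.mod num 2 = 0
        · exact good_false_count nums num (fun h2 => h ⟨h1, h2⟩)
        · exact good_false_odd nums num h1
      have hcond : ¬ (PySem.Int.mod num 2 = 0 ∧ (fuBuild nums).getD num 0 = 1) := by
        rw [fuBuild_getD]
        intro ⟨h1, h2⟩
        exact h ⟨h1, by exact_mod_cast h2⟩
      rw [hunf, if_neg hcond, hg, ih]
      rfl

-- erasing a key from a dict filters its key list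
lemma map_fst_filter_ne (k : Int) : ∀ (l : List (Int × Bool)),
    (l.filter (fun p => !(p.1 == k))).map Prod.fst
      = (l.map Prod.fst).filter (fun x => !(x == k)) := by
  intro l
  induction l with
  | nil => rfl
  | cons p t ih =>
    by_cases hp : p.1 = k <;> simp [hp, ih]

lemma keys_erase (d : PySem.Dict Int Bool) (k : Int) :
    (d.erase k).keys = d.keys.filter (fun x => !(x == k)) := by
  show (d.items.filter (fun p => !(p.1 == k))).map Prod.fst
      = (d.items.map Prod.fst).filter (fun x => !(x == k))
  exact map_fst_filter_ne k d.items

-- dropping one value from a filtered list = filtering with that value switched off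
lemma filter_off (num : Int) (f g : Int → Bool)
    (hag : ∀ v, v ≠ num → g v = f v) (hg : g num = false) :
    ∀ (p : List Int), (p.filter f).filter (fun x => !(x == num)) = p.filter g := by
  intro p
  induction p with
  | nil => rfl
  | cons x t ih =>
    by_cases hx : x = num
    · subst hx
      cases hfx : f x <;> simp [hfx, hg, ih]
    · have hgx : g x = f x := hag x hx
      cases hfx : f x <;> simp [hfx, hgx, hx, ih]

-- the loop invariant, one step
lemma fuStep_inv (p : List Int) (num : Int) (cand : PySem.Dict Int Bool) (dup : PySem.Set Int)
    (hc : cand.keys = p.filter (good p))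
    (hd : ∀ v, PySem.Set.contains dup v = true ↔ (PySem.Int.mod v 2 = 0 ∧ 2 ≤ p.count v)) :
    (fuStep (cand, dup) num).1.keys = (p ++ [num]).filter (good (p ++ [num])) ∧
    (∀ v, PySem.Set.contains (fuStep (cand, dup) num).2 v = true ↔
      (PySem.Int.mod v 2 = 0 ∧ 2 ≤ (p ++ [num]).count v)) := by
  have hgood_ne : ∀ v, v ≠ num → good (p ++ [num]) v = good p v := by
    intro v hv
    by_cases h1 : PySem.Int.mod v 2 = 0
    · by_cases h2 : p.count v = 1
      · rw [good_true p v h1 h2, good_true (p ++ [num]) v h1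
          (by rw [count_append_singleton, if_neg hv, h2])]
      · rw [good_false_count p v h2, good_false_count (p ++ [num]) v
          (by rw [count_append_singleton, if_neg hv]; omega)]
    · rw [good_false_odd p v h1, good_false_odd (p ++ [num]) v h1]
  by_cases heven : PySem.Int.mod num 2 = 0
  · by_cases hdup : PySem.Set.contains dup num = true
    · -- already a duplicate: state unchanged, count only grows
      have h2 : 2 ≤ p.count num := ((hd num).1 hdup).2
      have hstep : fuStep (cand, dup) num = (cand, dup) := by
        unfold fuStep; rw [if_pos (Or.inr hdup)]
      rw [hstep]
      have hnumold : good p num = false := good_false_count p num (by omega)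
      have hnum : good (p ++ [num]) num = false :=
        good_false_count (p ++ [num]) num
          (by rw [count_append_singleton, if_pos rfl]; omega)
      constructor
      · have hfp : List.filter (good (p ++ [num])) p = List.filter (good p) p :=
          List.filter_congr (fun v _ => by
            by_cases hvn : v = num
            · subst hvn; rw [hnum, hnumold]
            · exact hgood_ne v hvn)
        rw [hc, List.filter_append, hfp, List.filter_cons, hnum]
        simp
      · intro v
        rw [hd v, count_append_singleton]
        by_cases hvn : v = num
        · subst hvn; rw [if_pos rfl]
          exact ⟨fun h => ⟨h.1, by omega⟩, fun h => ⟨h.1, by omega⟩⟩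
        · rw [if_neg hvn, Nat.add_zero]
    · -- even, not yet a duplicate: count p num ≤ 1
      have hle : p.count num ≤ 1 := by
        by_contra hgt
        exact hdup ((hd num).2 ⟨heven, by omega⟩)
      by_cases hmem : cand.contains num = true
      · -- count p num = 1: remove from cand, add to dup
        have hmem' : num ∈ p.filter (good p) := by
          rw [← hc]; exact (PySem.Dict.contains_iff_mem_keys cand num).mp hmem
        have hone : p.count num = 1 :=
          (good_of_true p num (List.mem_filter.1 hmem').2).2
        have hstep : fuStep (cand, dup) num = (cand.erase num, PySem.Set.add dup num) := by
          unfold fuStep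
          rw [if_neg (fun h => h.elim (fun hne => hne heven) (fun hct => hdup hct)), if_pos hmem]
        rw [hstep]
        have hnum : good (p ++ [num]) num = false :=
          good_false_count (p ++ [num]) num
            (by rw [count_append_singleton, if_pos rfl]; omega)
        constructor
        · rw [keys_erase, hc,
            filter_off num (good p) (good (p ++ [num])) hgood_ne hnum p,
            List.filter_append, List.filter_cons, hnum]
          simp
        · intro v
          rw [PySem.Set.contains_iff, PySem.Set.mem_add, ← PySem.Set.contains_iff,
            hd v, count_append_singleton]
          by_cases hvn : v = num
          · subst hvn; rw [if_pos rfl, hone]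
            exact ⟨fun _ => ⟨heven, by omega⟩, fun _ => Or.inr rfl⟩
          · rw [if_neg hvn, Nat.add_zero]
            exact ⟨fun h => h.elim id (fun he => absurd he hvn), Or.inl⟩
      · -- count p num = 0: append to cand
        have hzero : p.count num = 0 := by
          by_contra hnz
          have h1 : p.count num = 1 := by omega
          have : num ∈ p.filter (good p) :=
            List.mem_filter.2 ⟨List.count_pos_iff.1 (by omega), good_true p num heven h1⟩
          exact hmem ((PySem.Dict.contains_iff_mem_keys cand num).mpr (hc ▸ this))
        have hstep : fuStep (cand, dup) num = (cand.insert num true, dup) := by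
          unfold fuStep
          rw [if_neg (fun h => h.elim (fun hne => hne heven) (fun hct => hdup hct)), if_neg hmem]
        rw [hstep]
        have hnp : num ∉ p := by
          intro hmem'
          have := List.count_pos_iff.mpr hmem'
          omega
        have hnum : good (p ++ [num]) num = true :=
          good_true (p ++ [num]) num heven
            (by rw [count_append_singleton, if_pos rfl, hzero])
        constructor
        · have hnc : cand.contains num = false := by
            cases h : cand.contains num
            · rfl
            · exact absurd h hmem
          have hfp : List.filter (good (p ++ [num])) p = List.filter (good p) p :=
            List.filter_congr (fun v hv => hgood_ne v (fun he => hnp (he ▸ hv)))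
          rw [PySem.Dict.keys_insert_of_not_contains cand true hnc, hc,
            List.filter_append, hfp, List.filter_cons, hnum]
          simp
        · intro v
          rw [hd v, count_append_singleton]
          by_cases hvn : v = num
          · subst hvn; rw [if_pos rfl]
            exact ⟨fun h => ⟨h.1, by omega⟩, fun h => absurd h.2 (by omega)⟩
          · rw [if_neg hvn, Nat.add_zero]
  · -- odd: skipped, counts of even values unchanged
    have hstep : fuStep (cand, dup) num = (cand, dup) := by
      unfold fuStep; rw [if_pos (Or.inl heven)]
    rw [hstep]
    have hnum : good (p ++ [num]) num = false := good_false_odd (p ++ [num]) num heven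
    have hnumold : good p num = false := good_false_odd p num heven
    constructor
    · have hfp : List.filter (good (p ++ [num])) p = List.filter (good p) p :=
        List.filter_congr (fun v _ => by
          by_cases hvn : v = num
          · subst hvn; rw [hnum, hnumold]
          · exact hgood_ne v hvn)
      rw [hc, List.filter_append, hfp, List.filter_cons, hnum]
      simp
    · intro v
      rw [hd v, count_append_singleton]
      by_cases hvn : v = num
      · subst hvn
        exact ⟨fun h => absurd h.1 heven, fun h => absurd h.1 heven⟩
      · rw [if_neg hvn, Nat.add_zero]

-- the invariant through the whole fold
lemma foldl_fuStep_inv (l : List Int) : ∀ (p : List Int) (cand : PySem.Dict Int Bool) (dup : PySem.Set Int),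
    cand.keys = p.filter (good p) →
    (∀ v, PySem.Set.contains dup v = true ↔ (PySem.Int.mod v 2 = 0 ∧ 2 ≤ p.count v)) →
    (l.foldl fuStep (cand, dup)).1.keys = (p ++ l).filter (good (p ++ l)) := by
  induction l with
  | nil => intro p cand dup hc _; simpa using hc
  | cons num rest ih =>
    intro p cand dup hc hd
    obtain ⟨hc', hd'⟩ := fuStep_inv p num cand dup hc hd
    have := ih (p ++ [num]) (fuStep (cand, dup) num).1 (fuStep (cand, dup) num).2 hc' hd'
    simpa [List.foldl_cons] using this

lemma cand_final (nums : List Int) :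
    (nums.foldl fuStep (PySem.Dict.empty, PySem.Set.empty)).1.keys = nums.filter (good nums) := by
  have := foldl_fuStep_inv nums [] PySem.Dict.empty PySem.Set.empty rfl (by
    intro v
    constructor
    · intro h; cases h
    · intro h; simp at h)
  simpa using this

-- ===== VERDICT (by name: the statement is the Claim_ definition above) =====
theorem firstUniqueEven_spec : Claim_equal_firstUniqueEven := by
  intro nums _
  unfold Spec_firstUniqueEven firstUniqueEven firstUniqueEven_alt
  rw [fuFind_eq_headFilter nums nums, cand_final nums]
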